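-- pv_equiv track=rewrite | github.com/pabloschwarzenberg/grader | tema4_ej3/tema4_ej3_14205912.py | Jeringozo
-- ===== SOURCE A (Python) =====
-- def Jeringozo(texto):
--     traducida=""
--     for letra in texto:
--         if letra=="a":
--             traducida+="apa"
--         if letra=="e":
--             traducida+="epe"
--         if letra=="i":
--             traducida+="ipi"
--         if letra=="o":
--             traducida+="opo"
--         if letra=="u":
--             traducida+="upu"
--         if letra!="a" and letra!="e" and letra!="i" and letra!="o" and letra!="u":
--             traducida+=letra
--     return traducida
-- ===== SOURCE B (Python) =====
-- def Jeringozo(texto):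
--     return (texto.replace("a", "apa")
--                  .replace("e", "epe")
--                  .replace("i", "ipi")
--                  .replace("o", "opo")
--                  .replace("u", "upu"))
-- ===== Notes on version B (the rewrite author's own statement) =====
-- stated objective: idiomatic
-- what changed: Replaces the explicit character loop with six guard tests and a string accumulator by five chained str.replace calls, one per vowel (safe because no expansion contains another vowel); the replaces run in C, a constant-factor speedup.
import Mathlib
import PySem

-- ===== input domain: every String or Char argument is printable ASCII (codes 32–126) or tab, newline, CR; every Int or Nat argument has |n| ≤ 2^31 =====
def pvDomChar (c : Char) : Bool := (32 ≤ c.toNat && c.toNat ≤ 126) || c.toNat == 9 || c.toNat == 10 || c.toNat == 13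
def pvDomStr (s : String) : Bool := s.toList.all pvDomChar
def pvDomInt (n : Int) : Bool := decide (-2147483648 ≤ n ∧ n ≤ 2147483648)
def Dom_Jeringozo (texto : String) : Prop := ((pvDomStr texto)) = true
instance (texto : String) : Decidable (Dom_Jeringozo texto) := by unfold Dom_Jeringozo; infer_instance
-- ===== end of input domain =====

-- B rewrites A's explicit per-character loop (six guards, string accumulator) as five
-- chained str.replace calls, one per vowel; equivalence is proved for all strings.

-- ===== PORT A =====
def Jeringozo (texto : String) : String :=
  texto.toList.foldl (fun traducida letra =>
    let traducida := if letra = 'a' then traducida ++ "apa" else traducida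
    let traducida := if letra = 'e' then traducida ++ "epe" else traducida
    let traducida := if letra = 'i' then traducida ++ "ipi" else traducida
    let traducida := if letra = 'o' then traducida ++ "opo" else traducida
    let traducida := if letra = 'u' then traducida ++ "upu" else traducida
    if letra ≠ 'a' ∧ letra ≠ 'e' ∧ letra ≠ 'i' ∧ letra ≠ 'o' ∧ letra ≠ 'u' then
      traducida ++ String.singleton letra
    else traducida) ""

-- ===== PORT B =====
def Jeringozo_alt (texto : String) : String :=
  PySem.Str.replace
    (PySem.Str.replace
      (PySem.Str.replace
        (PySem.Str.replace
          (PySem.Str.replace texto "a" "apa") "e" "epe") "i" "ipi") "o" "opo") "u" "upu"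

-- ===== PRECONDITION & SPEC =====
def Spec_Jeringozo (texto : String) (out : String) : Prop := out = Jeringozo_alt texto
instance (texto : String) (out : String) : Decidable (Spec_Jeringozo texto out) := by unfold Spec_Jeringozo; infer_instance

-- ===== CLAIM (what is proved, stated in full; the proofs are below) =====
def Claim_equal_Jeringozo : Prop := ∀ (texto : String), Dom_Jeringozo texto → Spec_Jeringozo texto (Jeringozo texto)

-- ===== LEMMAS AND PROOFS =====

/-- Single-character substitution map: `subst v nl c` is `nl` if `c = v`, else `[c]`. -/
def subst (v : Char) (nl : List Char) (c : Char) : List Char :=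
  if c = v then nl else [c]

/-- The full Jeringozo expansion of one character. -/
def expand (c : Char) : List Char :=
  if c = 'a' then "apa".toList
  else if c = 'e' then "epe".toList
  else if c = 'i' then "ipi".toList
  else if c = 'o' then "opo".toList
  else if c = 'u' then "upu".toList
  else [c]

lemma replace_go_single (v : Char) (nl : List Char) :
    ∀ (l acc : List Char),
      PySem.Chars.replace.go [v] nl l.length l acc =
        acc.reverse ++ l.flatMap (subst v nl) := by
  intro l
  induction l with
  | nil => intro acc; simp [PySem.Chars.replace.go]
  | cons c t ih =>
      intro acc
      unfold PySem.Chars.replace.go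
      simp only [List.length_cons]
      by_cases h : c = v
      · subst h
        simp only [List.isPrefixOf, beq_self_eq_true, Bool.true_and,
          List.drop_succ_cons, if_true, List.length_nil, List.drop_zero]
        rw [ih (nl.reverse ++ acc)]
        simp [subst]
      · have hp : [v].isPrefixOf (c :: t) = false := by
          simp [List.isPrefixOf]; exact fun hvc => absurd hvc.symm h
        simp only [hp, Bool.false_eq_true, if_false]
        have := ih (c :: acc)
        simp only [] at this ⊢
        rw [this]
        simp [subst, h]

lemma replace_single (v : Char) (nl : List Char) (s : List Char) :
    PySem.Chars.replace s [v] nl = s.flatMap (subst v nl) := by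
  unfold PySem.Chars.replace
  simp [replace_go_single]

lemma expand_decomp (c : Char) :
    ((subst 'a' "apa".toList c).flatMap (fun x =>
      (subst 'e' "epe".toList x).flatMap (fun x =>
        (subst 'i' "ipi".toList x).flatMap (fun x =>
          (subst 'o' "opo".toList x).flatMap (subst 'u' "upu".toList))))) = expand c := by
  by_cases ha : c = 'a'
  · subst ha; decide
  by_cases he : c = 'e'
  · subst he; decide
  by_cases hi : c = 'i'
  · subst hi; decide
  by_cases ho : c = 'o'
  · subst ho; decide
  by_cases hu : c = 'u'
  · subst hu; decide
  simp [subst, expand, ha, he, hi, ho, hu]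

lemma alt_toList (texto : String) :
    (Jeringozo_alt texto).toList = texto.toList.flatMap expand := by
  unfold Jeringozo_alt
  simp only [PySem.Str.toList_replace]
  have sa : ("a" : String).toList = ['a'] := rfl
  have se : ("e" : String).toList = ['e'] := rfl
  have si : ("i" : String).toList = ['i'] := rfl
  have so : ("o" : String).toList = ['o'] := rfl
  have su : ("u" : String).toList = ['u'] := rfl
  rw [sa, se, si, so, su, replace_single, replace_single, replace_single,
    replace_single, replace_single]
  simp only [List.flatMap_assoc]
  exact List.flatMap_congr (fun c _ => expand_decomp c)

lemma step_eq (traducida : String) (letra : Char) :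
    (let t := if letra = 'a' then traducida ++ "apa" else traducida
     let t := if letra = 'e' then t ++ "epe" else t
     let t := if letra = 'i' then t ++ "ipi" else t
     let t := if letra = 'o' then t ++ "opo" else t
     let t := if letra = 'u' then t ++ "upu" else t
     if letra ≠ 'a' ∧ letra ≠ 'e' ∧ letra ≠ 'i' ∧ letra ≠ 'o' ∧ letra ≠ 'u' then
       t ++ String.singleton letra
     else t) = traducida ++ String.ofList (expand letra) := by
  apply String.toList_injective
  by_cases ha : letra = 'a'
  · subst ha; simp [expand]
  by_cases he : letra = 'e'
  · subst he; simp [expand]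
  by_cases hi : letra = 'i'
  · subst hi; simp [expand]
  by_cases ho : letra = 'o'
  · subst ho; simp [expand]
  by_cases hu : letra = 'u'
  · subst hu; simp [expand]
  · simp [expand, ha, he, hi, ho, hu, String.singleton]

lemma foldl_expand (l : List Char) :
    ∀ (init : String),
      l.foldl (fun t c => t ++ String.ofList (expand c)) init =
        init ++ String.ofList (l.flatMap expand) := by
  induction l with
  | nil =>
      intro init
      apply String.toList_injective
      simp
  | cons c t ih =>
      intro init
      simp only [List.foldl_cons, List.flatMap_cons, ih]
      apply String.toList_injective
      simp

-- ===== VERDICT (by name: the statement is the Claim_ definition above) =====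
theorem Jeringozo_spec : Claim_equal_Jeringozo := by
  intro texto _
  unfold Spec_Jeringozo Jeringozo
  have hfold : texto.toList.foldl
      (fun traducida letra =>
        let traducida := if letra = 'a' then traducida ++ "apa" else traducida
        let traducida := if letra = 'e' then traducida ++ "epe" else traducida
        let traducida := if letra = 'i' then traducida ++ "ipi" else traducida
        let traducida := if letra = 'o' then traducida ++ "opo" else traducida
        let traducida := if letra = 'u' then traducida ++ "upu" else traducida
        if letra ≠ 'a' ∧ letra ≠ 'e' ∧ letra ≠ 'i' ∧ letra ≠ 'o' ∧ letra ≠ 'u' then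
          traducida ++ String.singleton letra
        else traducida) "" =
      texto.toList.foldl (fun t c => t ++ String.ofList (expand c)) "" := by
    exact PySem.List.foldl_congr_mem _ _ _ _ (fun t c _ => step_eq t c)
  rw [hfold, foldl_expand]
  apply String.toList_injective
  simp [alt_toList]
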